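-- pv_equiv track=rewrite | github.com/matthewdholtkamp/testfile | scripts/dashboard_ui.py | derive_phase_pulls
-- ===== SOURCE A (Python) =====
-- PHASE_META = [
--     ('phase1', 'Phase 1', 'Process Lanes'),
--     ('phase2', 'Phase 2', 'Causal Transitions'),
--     ('phase3', 'Phase 3', 'Progression Objects'),
--     ('phase4', 'Phase 4', 'Translational Logic'),
--     ('phase5', 'Phase 5', 'Cohort Stratification'),
--     ('phase6', 'Phase 6', 'Hypothesis Rankings'),
-- ]
--
-- def normalize(value):
--     if value is None:
--         return ''
--     return ' '.join(str(value).split()).strip()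
--
-- def targeted_upstream_phase(row):
--     if row.get('linked_phase4_packet_ids'):
--         return 'phase4'
--     if row.get('linked_phase5_endotype_ids'):
--         return 'phase5'
--     if row.get('linked_phase3_object_ids'):
--         return 'phase3'
--     if row.get('linked_phase2_transition_ids'):
--         return 'phase2'
--     return 'phase1'
--
-- def derive_phase_pulls(primary_row):
--     pulls = {key: 'background' for key, _, _ in PHASE_META}
--     family = normalize(primary_row.get('family_id')) if primary_row else ''
--     if family == 'strongest_causal_bridge':
--         pulls.update({'phase2': 'driving now', 'phase6': 'driving now', 'phase1': 'supporting now', 'phase3': 'supporting now', 'phase5': 'supporting now'})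
--         if primary_row.get('linked_phase4_packet_ids'):
--             pulls['phase4'] = 'supporting now'
--     elif family == 'weakest_evidence_hinge':
--         pulls.update({'phase2': 'driving now', 'phase5': 'driving now', 'phase6': 'driving now', 'phase1': 'supporting now', 'phase3': 'supporting now', 'phase4': 'supporting now'})
--     elif family == 'best_intervention_leverage_point':
--         pulls.update({'phase4': 'driving now', 'phase6': 'driving now', 'phase1': 'supporting now', 'phase2': 'supporting now', 'phase3': 'supporting now', 'phase5': 'supporting now'})
--     elif family == 'most_informative_biomarker_panel':
--         pulls.update({'phase4': 'driving now', 'phase5': 'driving now', 'phase6': 'driving now', 'phase1': 'supporting now', 'phase2': 'supporting now', 'phase3': 'supporting now'})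
--     elif family == 'highest_value_next_task':
--         pulls.update({'phase6': 'driving now'})
--         pulls[targeted_upstream_phase(primary_row)] = 'driving now'
--         for key in pulls:
--             if pulls[key] == 'background' and key != 'phase6':
--                 pulls[key] = 'supporting now'
--     return pulls
-- ===== SOURCE B (Python) =====
-- PHASES = ['phase1', 'phase2', 'phase3', 'phase4', 'phase5', 'phase6']
-- STATUS = {'D': 'driving now', 'S': 'supporting now', 'B': 'background'}
-- FAMILY_CODES = {
--     'weakest_evidence_hinge': 'SDSSDD',
--     'best_intervention_leverage_point': 'SSSDSD',
--     'most_informative_biomarker_panel': 'SSSDDD',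
-- }
-- UPSTREAM = [(3, 'linked_phase4_packet_ids'), (4, 'linked_phase5_endotype_ids'),
--             (2, 'linked_phase3_object_ids'), (1, 'linked_phase2_transition_ids')]
--
--
-- def normalize(value):
--     if value is None:
--         return ''
--     return ' '.join(str(value).split()).strip()
--
--
-- def derive_phase_pulls(primary_row):
--     family = normalize(primary_row.get('family_id')) if primary_row else ''
--     if family == 'strongest_causal_bridge':
--         code = 'SDSSSD' if primary_row.get('linked_phase4_packet_ids') else 'SDSBSD'
--     elif family == 'highest_value_next_task':
--         idx = next((i for i, field in UPSTREAM if primary_row.get(field)), 0)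
--         code = ''.join('D' if i in (idx, 5) else 'S' for i in range(6))
--     else:
--         code = FAMILY_CODES.get(family, 'BBBBBB')
--     return {p: STATUS[c] for p, c in zip(PHASES, code)}
-- ===== Notes on version B (the rewrite author's own statement) =====
-- stated objective: simpler
-- what changed: Replaces A's mutable dict initialised to background with per-family update() batches and a promote loop by a table of precomputed 6-letter status-code strings (one per family outcome, built dynamically only for the target index of highest_value_next_task) decoded by zipping with the fixed phase order.
import Mathlib
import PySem

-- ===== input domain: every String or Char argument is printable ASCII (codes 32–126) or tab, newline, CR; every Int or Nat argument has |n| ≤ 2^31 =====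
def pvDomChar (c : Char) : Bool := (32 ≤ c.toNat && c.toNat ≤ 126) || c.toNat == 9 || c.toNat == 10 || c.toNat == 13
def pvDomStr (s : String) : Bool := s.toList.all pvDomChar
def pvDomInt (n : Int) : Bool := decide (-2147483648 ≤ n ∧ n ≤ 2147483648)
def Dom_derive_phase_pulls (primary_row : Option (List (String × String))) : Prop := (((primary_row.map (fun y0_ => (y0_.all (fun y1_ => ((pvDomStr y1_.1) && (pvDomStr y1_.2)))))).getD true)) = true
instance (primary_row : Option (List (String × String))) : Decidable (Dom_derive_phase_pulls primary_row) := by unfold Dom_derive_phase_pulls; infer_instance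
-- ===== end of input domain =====

-- B replaces A's mutable background-dict, per-family update() batches and promote loop by a
-- precomputed 6-letter status-code string per family, decoded by zipping with the phase order
-- (objective: simpler).

-- shared helpers (identical in Source A and Source B): row.get, truthiness, normalize
def pvRGet (row : List (String × String)) (k : String) : Option String :=
  (PySem.Dict.ofList row).get? k

def pvTruthy (o : Option String) : Bool :=
  match o with
  | none => false
  | some s => s != ""

def pvNormalize (value : Option String) : String :=
  match value with
  | none => ""
  | some s => PySem.Str.strip (PySem.Str.join " " (PySem.Str.split₀ s))

-- ===== PORT A =====
def pvPhaseMeta : List (String × String × String) :=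
  [("phase1", "Phase 1", "Process Lanes"),
   ("phase2", "Phase 2", "Causal Transitions"),
   ("phase3", "Phase 3", "Progression Objects"),
   ("phase4", "Phase 4", "Translational Logic"),
   ("phase5", "Phase 5", "Cohort Stratification"),
   ("phase6", "Phase 6", "Hypothesis Rankings")]

def pvTargetedUpstreamPhase (row : List (String × String)) : String :=
  if pvTruthy (pvRGet row "linked_phase4_packet_ids") then "phase4"
  else if pvTruthy (pvRGet row "linked_phase5_endotype_ids") then "phase5"
  else if pvTruthy (pvRGet row "linked_phase3_object_ids") then "phase3"
  else if pvTruthy (pvRGet row "linked_phase2_transition_ids") then "phase2"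
  else "phase1"

def derive_phase_pulls (primary_row : Option (List (String × String))) : List (String × String) :=
  let pulls : PySem.Dict String String :=
    pvPhaseMeta.foldl (fun d m => d.insert m.1 "background") PySem.Dict.empty
  -- primary_row is only read where Python guarantees it is a truthy dict; getD [] totalizes
  let row := primary_row.getD []
  let family :=
    match primary_row with
    | none => ""
    | some r => if r.isEmpty then "" else pvNormalize (pvRGet r "family_id")
  let pulls :=
    if family == "strongest_causal_bridge" then
      let p := ((((pulls.insert "phase2" "driving now").insert "phase6" "driving now").insert
        "phase1" "supporting now").insert "phase3" "supporting now").insert "phase5" "supporting now"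
      if pvTruthy (pvRGet row "linked_phase4_packet_ids") then p.insert "phase4" "supporting now" else p
    else if family == "weakest_evidence_hinge" then
      (((((pulls.insert "phase2" "driving now").insert "phase5" "driving now").insert "phase6" "driving now").insert
        "phase1" "supporting now").insert "phase3" "supporting now").insert "phase4" "supporting now"
    else if family == "best_intervention_leverage_point" then
      (((((pulls.insert "phase4" "driving now").insert "phase6" "driving now").insert "phase1" "supporting now").insert
        "phase2" "supporting now").insert "phase3" "supporting now").insert "phase5" "supporting now"
    else if family == "most_informative_biomarker_panel" then
      (((((pulls.insert "phase4" "driving now").insert "phase5" "driving now").insert "phase6" "driving now").insert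
        "phase1" "supporting now").insert "phase2" "supporting now").insert "phase3" "supporting now"
    else if family == "highest_value_next_task" then
      let p := pulls.insert "phase6" "driving now"
      let p := p.insert (pvTargetedUpstreamPhase row) "driving now"
      p.keys.foldl
        (fun d k => if d.getD k "" == "background" && k != "phase6" then d.insert k "supporting now" else d) p
    else pulls
  pulls.items

-- ===== PORT B =====
def pvPhases : List String := ["phase1", "phase2", "phase3", "phase4", "phase5", "phase6"]

def pvStatus : PySem.Dict Char String :=
  PySem.Dict.ofList [('D', "driving now"), ('S', "supporting now"), ('B', "background")]

def pvFamilyCodes : PySem.Dict String String :=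
  PySem.Dict.ofList
    [("weakest_evidence_hinge", "SDSSDD"),
     ("best_intervention_leverage_point", "SSSDSD"),
     ("most_informative_biomarker_panel", "SSSDDD")]

def pvUpstream : List (Nat × String) :=
  [(3, "linked_phase4_packet_ids"), (4, "linked_phase5_endotype_ids"),
   (2, "linked_phase3_object_ids"), (1, "linked_phase2_transition_ids")]

def derive_phase_pulls_alt (primary_row : Option (List (String × String))) : List (String × String) :=
  let row := primary_row.getD []
  let family :=
    match primary_row with
    | none => ""
    | some r => if r.isEmpty then "" else pvNormalize (pvRGet r "family_id")
  let code :=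
    if family == "strongest_causal_bridge" then
      if pvTruthy (pvRGet row "linked_phase4_packet_ids") then "SDSSSD" else "SDSBSD"
    else if family == "highest_value_next_task" then
      let idx :=
        match pvUpstream.find? (fun p => pvTruthy (pvRGet row p.2)) with
        | some p => p.1
        | none => 0
      String.ofList ((List.range 6).map (fun i => if i == idx || i == 5 then 'D' else 'S'))
    else pvFamilyCodes.getD family "BBBBBB"
  -- STATUS[c]: the codes only contain 'D'/'S'/'B', so getD "" is exact here
  (pvPhases.zip code.toList).map (fun pc => (pc.1, pvStatus.getD pc.2 ""))

-- ===== PRECONDITION & SPEC =====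
def Spec_derive_phase_pulls (primary_row : Option (List (String × String))) (out : List (String × String)) : Prop := out = derive_phase_pulls_alt primary_row
instance (primary_row : Option (List (String × String))) (out : List (String × String)) : Decidable (Spec_derive_phase_pulls primary_row out) := by unfold Spec_derive_phase_pulls; infer_instance

-- ===== CLAIM (what is proved, stated in full; the proofs are below) =====
def Claim_equal_derive_phase_pulls : Prop := ∀ (primary_row : Option (List (String × String))), Dom_derive_phase_pulls primary_row → Spec_derive_phase_pulls primary_row (derive_phase_pulls primary_row)

-- ===== LEMMAS AND PROOFS =====

lemma codes_getD (f : String) (h2 : ¬ f = "weakest_evidence_hinge")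
    (h3 : ¬ f = "best_intervention_leverage_point")
    (h4 : ¬ f = "most_informative_biomarker_panel") :
    pvFamilyCodes.getD f "BBBBBB" = "BBBBBB" := by
  have e : pvFamilyCodes.get? f = none := by
    unfold pvFamilyCodes
    rw [show PySem.Dict.ofList
        [("weakest_evidence_hinge", "SDSSDD"), ("best_intervention_leverage_point", "SSSDSD"),
         ("most_informative_biomarker_panel", "SSSDDD")] = PySem.Dict.mk
        [("weakest_evidence_hinge", "SDSSDD"), ("best_intervention_leverage_point", "SSSDSD"),
         ("most_informative_biomarker_panel", "SSSDDD")] from by decide]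
    simp [Ne.symm h2, Ne.symm h3, Ne.symm h4, PySem.Dict.get?]
  rw [PySem.Dict.getD_eq_get?_getD, e]; rfl

lemma core_eq (r : List (String × String)) (hr : r.isEmpty = false) :
    derive_phase_pulls (some r) = derive_phase_pulls_alt (some r) := by
  unfold derive_phase_pulls derive_phase_pulls_alt pvTargetedUpstreamPhase
  simp only [Option.getD, hr, if_false, Bool.false_eq_true]
  generalize pvNormalize (pvRGet r "family_id") = f
  by_cases h4 : pvTruthy (pvRGet r "linked_phase4_packet_ids") = true <;>
  by_cases h5 : pvTruthy (pvRGet r "linked_phase5_endotype_ids") = true <;>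
  by_cases h3 : pvTruthy (pvRGet r "linked_phase3_object_ids") = true <;>
  by_cases h2 : pvTruthy (pvRGet r "linked_phase2_transition_ids") = true <;>
  by_cases hf1 : f = "strongest_causal_bridge" <;>
  by_cases hf2 : f = "weakest_evidence_hinge" <;>
  by_cases hf3 : f = "best_intervention_leverage_point" <;>
  by_cases hf4 : f = "most_informative_biomarker_panel" <;>
  by_cases hf5 : f = "highest_value_next_task" <;>
  simp_all [pvUpstream, codes_getD] <;> rfl

-- ===== VERDICT (by name: the statement is the Claim_ definition above) =====
theorem derive_phase_pulls_spec : Claim_equal_derive_phase_pulls := by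
  intro primary_row _
  unfold Spec_derive_phase_pulls
  match primary_row with
  | none => decide
  | some r =>
    cases hr : r.isEmpty with
    | true =>
      have : r = [] := by cases r <;> simp_all
      subst this; decide
    | false => exact core_eq r hr
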